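-- pv_equiv track=rewrite | github.com/emilmerle/advent_of_code_24 | day09/main.py | calculate_checksum_part1
-- ===== SOURCE A (Python) =====
-- FREE_SPACE = "."
--
-- def calculate_checksum_part1(filesystem: list[str]) -> int:
--     total_sum = 0
--     for index in range(len(filesystem) - 1):
--         if filesystem[index] == FREE_SPACE:
--             return total_sum
--         else:
--             total_sum = total_sum + index * int(filesystem[index])
--     return total_sum
-- ===== SOURCE B (Python) =====
-- FREE_SPACE = "."
--
-- def calculate_checksum_part1(filesystem):
--     # Different algorithm: no index*value products at all. Maintain the running
--     # sum of values and the sum of those running sums ("staircase"); by the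
--     # identity sum(i*v_i for i<e) = e*S - sum_{i<e}(v_0+...+v_i), the checksum
--     # is count*running - staircase at the first free space (or end of prefix).
--     count = 0
--     running = 0
--     staircase = 0
--     for value in filesystem[:-1]:
--         if value == FREE_SPACE:
--             break
--         running += int(value)
--         staircase += running
--         count += 1
--     return count * running - staircase
-- ===== Notes on version B (the rewrite author's own statement) =====
-- stated objective: alternative
-- what changed: Replaces A's index*value accumulation with a multiplication-free pass that maintains the running sum of values and the sum of those running sums, recovering the checksum at the cut point via the identity sum(i*v_i, i<e) = e*S - sum of prefix sums.
import Mathlib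
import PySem

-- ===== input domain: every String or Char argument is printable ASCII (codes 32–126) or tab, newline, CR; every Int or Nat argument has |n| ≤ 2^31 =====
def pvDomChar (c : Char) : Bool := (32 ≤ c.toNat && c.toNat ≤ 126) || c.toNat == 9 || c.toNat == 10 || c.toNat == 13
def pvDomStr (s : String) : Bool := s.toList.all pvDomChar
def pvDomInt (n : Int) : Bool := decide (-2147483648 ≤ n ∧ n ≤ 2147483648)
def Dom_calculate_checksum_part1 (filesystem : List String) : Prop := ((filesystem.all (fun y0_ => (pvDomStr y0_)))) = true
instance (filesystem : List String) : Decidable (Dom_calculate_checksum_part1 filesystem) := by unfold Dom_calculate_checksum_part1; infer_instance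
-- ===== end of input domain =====

-- B replaces A's index*value accumulation with a multiplication-free running-sum/staircase pass
-- (identity: sum(i*v_i, i<e) = e*S - sum of prefix sums); same cost, different algorithm.

-- ===== PORT A =====
-- the for-loop with early return, as forward recursion over the index
def pvAGo (filesystem : List String) (n : Nat) (index : Nat) (total_sum : Int) : Int :=
  if index < n then
    if filesystem.getD index "" == "." then total_sum
    else pvAGo filesystem n (index + 1)
      (total_sum + (index : Int) * ((PySem.Int.ofStr? (filesystem.getD index "")).getD 0))
  else total_sum
termination_by n - index

def calculate_checksum_part1 (filesystem : List String) : Int :=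
  pvAGo filesystem (filesystem.length - 1) 0 0

-- ===== PORT B =====
-- the for-loop over filesystem[:-1] with break, as structural recursion carrying
-- (count, running, staircase); result is count*running - staircase
def pvBGo : List String → Int → Int → Int → Int
  | [], count, running, staircase => count * running - staircase
  | v :: rest, count, running, staircase =>
    if v == "." then count * running - staircase
    else
      pvBGo rest (count + 1) (running + (PySem.Int.ofStr? v).getD 0)
        (staircase + (running + (PySem.Int.ofStr? v).getD 0))

def calculate_checksum_part1_alt (filesystem : List String) : Int :=
  pvBGo filesystem.dropLast 0 0 0

-- ===== PRECONDITION & SPEC =====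
-- Pre_ excludes exactly the inputs on which Python's int() raises ValueError in both programs:
-- some element before the first "." (among all but the last element) does not parse as an int.
def Pre_calculate_checksum_part1 (filesystem : List String) : Prop :=
  ∀ s ∈ filesystem.dropLast.takeWhile (fun t => t != "."), (PySem.Int.ofStr? s).isSome = true
instance (filesystem : List String) : Decidable (Pre_calculate_checksum_part1 filesystem) := by
  unfold Pre_calculate_checksum_part1; infer_instance

def pvWitness_calculate_checksum_part1 : List String := ["1", "2", ".", "x"]

def Spec_calculate_checksum_part1 (filesystem : List String) (out : Int) : Prop := out = calculate_checksum_part1_alt filesystem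
instance (filesystem : List String) (out : Int) : Decidable (Spec_calculate_checksum_part1 filesystem out) := by unfold Spec_calculate_checksum_part1; infer_instance

-- ===== CLAIM (what is proved, stated in full; the proofs are below) =====
def Claim_equal_calculate_checksum_part1 : Prop := ∀ (filesystem : List String), Dom_calculate_checksum_part1 filesystem → Pre_calculate_checksum_part1 filesystem → Spec_calculate_checksum_part1 filesystem (calculate_checksum_part1 filesystem)

-- ===== LEMMAS AND PROOFS =====

-- value of a parsed element
def pvVal (s : String) : Int := (PySem.Int.ofStr? s).getD 0

-- sum of values of the prefix before the first "."
def pvS : List String → Int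
  | [] => 0
  | v :: rest => if v == "." then 0 else pvVal v + pvS rest

-- weighted sum  Σ i * v_i  over the prefix before the first "."
def pvW : List String → Int
  | [] => 0
  | v :: rest => if v == "." then 0 else pvS rest + pvW rest

-- B's loop in closed form
theorem pvBGo_eq : ∀ (l : List String) (c r t : Int),
    pvBGo l c r t = c * r - t + c * pvS l + pvW l := by
  intro l
  induction l with
  | nil => intro c r t; simp [pvBGo, pvS, pvW]
  | cons v rest ih =>
    intro c r t
    by_cases h : (v == ".") = true
    · simp [pvBGo, pvS, pvW, h]
    · simp only [pvBGo, pvS, pvW, h, Bool.false_eq_true, if_false, ih, pvVal]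
      ring

-- elements of the dropLast prefix agree with the original list
theorem pv_getD_dropLast (fs : List String) (i : Nat) (h : i < fs.dropLast.length) (d : String) :
    fs.dropLast.getD i d = fs.getD i d := by
  have h' : i < fs.length := lt_of_lt_of_le h (by simp)
  rw [List.getD_eq_getElem _ _ h, List.getD_eq_getElem _ _ h', List.getElem_dropLast]

-- core loop characterisation of A: starting j steps below the boundary, A's loop folds the remaining indices
theorem pvAGo_eq (fs : List String) (j : Nat) :
    ∀ (i : Nat) (acc : Int), i + j = fs.dropLast.findIdx (· == ".") →
      pvAGo fs fs.dropLast.length i acc =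
        (List.range' i j).foldl
          (fun (acc : Int) (index : Nat) => acc + (index : Int) * pvVal (fs.getD index "")) acc := by
  induction j with
  | zero =>
    intro i acc hi
    simp only [Nat.add_zero] at hi
    subst hi
    rw [pvAGo, List.range'_zero, List.foldl_nil]
    by_cases h : fs.dropLast.findIdx (· == ".") < fs.dropLast.length
    · have hget := List.findIdx_getElem (w := h)
      have hd : (fs.getD (fs.dropLast.findIdx (· == ".")) "" == ".") = true := by
        rw [← pv_getD_dropLast fs _ h "", List.getD_eq_getElem _ _ h]
        simpa using hget
      rw [if_pos h, if_pos hd]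
    · rw [if_neg h]
  | succ j ih =>
    intro i acc hi
    have hilt : i < fs.dropLast.findIdx (· == ".") := by omega
    have hle : fs.dropLast.findIdx (· == ".") ≤ fs.dropLast.length := List.findIdx_le_length
    have hin : i < fs.dropLast.length := by omega
    have hne : ¬ (fs.getD i "" == ".") = true := by
      rw [← pv_getD_dropLast fs i hin "", List.getD_eq_getElem _ _ hin]
      simpa using List.not_of_lt_findIdx hilt
    rw [pvAGo, if_pos hin, if_neg hne, List.range'_succ, List.foldl_cons]
    simp only [pvVal]
    exact ih (i + 1) _ (by omega)

-- the indexed fold over the prefix length, shifted by k, in closed form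
theorem pv_fold_eq : ∀ (l : List String) (k acc : Int),
    (List.range (l.findIdx (· == "."))).foldl
        (fun (a : Int) (i : Nat) => a + ((i : Int) + k) * pvVal (l.getD i "")) acc
      = acc + k * pvS l + pvW l := by
  intro l
  induction l with
  | nil => intro k acc; simp [pvS, pvW]
  | cons v rest ih =>
    intro k acc
    by_cases h : (v == ".") = true
    · simp [List.findIdx_cons, h, pvS, pvW]
    · rw [List.findIdx_cons]
      simp only [h, cond_false]
      rw [List.range_succ_eq_map, List.foldl_cons, List.foldl_map]
      have hfun :
          (fun (a : Int) (i : Nat) => a + (((Nat.succ i : Nat) : Int) + k) * pvVal ((v :: rest).getD (Nat.succ i) "")) =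
          (fun (a : Int) (i : Nat) => a + ((i : Int) + (k + 1)) * pvVal (rest.getD i "")) := by
        funext a i
        simp only [Nat.succ_eq_add_one, List.getD_cons_succ]
        push_cast
        ring_nf
      rw [hfun, ih (k + 1)]
      simp only [pvS, pvW, h, if_false, Bool.false_eq_true, List.getD_cons_zero,
        Nat.cast_zero]
      ring

-- ===== VERDICT (by name: the statement is the Claim_ definition above) =====
theorem calculate_checksum_part1_spec : Claim_equal_calculate_checksum_part1 := by
  intro fs _ _
  unfold Spec_calculate_checksum_part1 calculate_checksum_part1 calculate_checksum_part1_alt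
  have hlen : fs.length - 1 = fs.dropLast.length := by simp
  rw [hlen, pvAGo_eq fs (fs.dropLast.findIdx (· == ".")) 0 0 (by omega),
      ← List.range_eq_range', pvBGo_eq]
  have hcong :
      (List.range (fs.dropLast.findIdx (· == "."))).foldl
          (fun (acc : Int) (index : Nat) => acc + (index : Int) * pvVal (fs.getD index "")) 0
        = (List.range (fs.dropLast.findIdx (· == "."))).foldl
          (fun (a : Int) (i : Nat) => a + ((i : Int) + 0) * pvVal (fs.dropLast.getD i "")) 0 := by
    apply PySem.List.foldl_congr_mem
    intro acc x hx
    have hxe : x < fs.dropLast.findIdx (· == ".") := by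
      have := List.mem_range.mp hx
      omega
    have hxl : x < fs.dropLast.length := lt_of_lt_of_le hxe List.findIdx_le_length
    rw [pv_getD_dropLast fs x hxl ""]
    ring_nf
  rw [hcong, pv_fold_eq]
  ring
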